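-- pv_equiv track=rewrite | github.com/parmsam/familyview | relations.py | ancestors_with_depth
-- ===== SOURCE A (Python) =====
-- from collections import deque
--
-- def ancestors_with_depth(person_id: int, parents_of: dict) -> dict[int, int]:
--     """
--     BFS upward from person_id following parent edges.
--     Returns {ancestor_id: depth} with depth=0 meaning self.
--     """
--     visited: dict[int, int] = {person_id: 0}
--     queue = deque([(person_id, 0)])
--     while queue:
--         current, depth = queue.popleft()
--         for parent in parents_of.get(current, set()):
--             if parent not in visited:
--                 visited[parent] = depth + 1
--                 queue.append((parent, depth + 1))
--     return visited
-- ===== SOURCE B (Python) =====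
-- def ancestors_with_depth(person_id: int, parents_of: dict) -> dict[int, int]:
--     """Round-based closure: repeatedly rescan the whole visited dict and
--     collect every not-yet-visited parent of any visited node, until a full
--     scan discovers nothing new.  No queue and no frontier is maintained."""
--     visited = {person_id: 0}
--     while True:
--         new = {p: d + 1
--                for node, d in visited.items()
--                for p in parents_of.get(node, ())
--                if p not in visited}
--         if not new:
--             return visited
--         visited.update(new)
-- ===== Notes on version B (the rewrite author's own statement) =====
-- stated objective: alternative
-- what changed: Replaces A's single-pass BFS with an explicit deque of (node, depth) pairs by round-based closure iteration: each round rebuilds a dict comprehension over the entire visited dict, collecting every not-yet-visited parent, and merges it in until a full rescan finds nothing new; no queue or frontier is kept (the trade-off is rescanning visited once per level).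
import Mathlib
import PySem

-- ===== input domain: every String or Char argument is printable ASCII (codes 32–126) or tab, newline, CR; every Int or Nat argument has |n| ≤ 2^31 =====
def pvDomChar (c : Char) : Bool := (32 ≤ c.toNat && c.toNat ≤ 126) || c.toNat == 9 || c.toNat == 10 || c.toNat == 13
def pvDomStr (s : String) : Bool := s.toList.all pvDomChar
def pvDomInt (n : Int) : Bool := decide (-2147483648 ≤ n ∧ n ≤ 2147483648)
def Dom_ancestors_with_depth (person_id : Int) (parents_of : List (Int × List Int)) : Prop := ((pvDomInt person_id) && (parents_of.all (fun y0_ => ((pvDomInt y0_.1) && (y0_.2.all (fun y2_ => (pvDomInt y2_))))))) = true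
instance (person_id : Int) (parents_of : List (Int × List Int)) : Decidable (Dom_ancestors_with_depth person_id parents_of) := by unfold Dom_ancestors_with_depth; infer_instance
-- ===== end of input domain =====

-- B replaces A's deque-based BFS by round-based closure iteration: it repeatedly rescans the
-- whole visited dict and adds every newly reachable parent, until a scan discovers nothing new.

-- shared helper: parents_of.get(k, <empty>) — first-match association-list lookup (Python dict.get)
def pvLook (parents_of : List (Int × List Int)) (k : Int) : List Int :=
  match parents_of with
  | [] => []
  | (a, b) :: rest => if a == k then b else pvLook rest k

-- termination measure helper: number of ids occurring as a parent anywhere that are not yet visited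
def pvUnseen (parents_of : List (Int × List Int)) (v : PySem.Dict Int Int) : Nat :=
  ((parents_of.flatMap Prod.snd).filter (fun x => !(v.contains x))).length

-- ===== PORT A =====
-- inner 'for parent in parents_of.get(current, set())' of A: updates visited, returns the queue entries appended
def pvPushA (v : PySem.Dict Int Int) (ps : List Int) (d : Int) :
    PySem.Dict Int Int × List (Int × Int) :=
  match ps with
  | [] => (v, [])
  | p :: rest =>
    if v.contains p then pvPushA v rest d
    else
      let r := pvPushA (v.insert p d) rest d
      (r.1, (p, d) :: r.2)

theorem pvUnseen_insert_lt (pof : List (Int × List Int)) (v : PySem.Dict Int Int) (p : Int) (d : Int)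
    (hmem : p ∈ pof.flatMap Prod.snd) (hc : v.contains p = false) :
    pvUnseen pof (v.insert p d) < pvUnseen pof v := by
  unfold pvUnseen
  have hfun : ∀ x : Int, (!((v.insert p d).contains x)) = ((!(x == p)) && !(v.contains x)) := by
    intro x
    rw [PySem.Dict.contains_insert]
    cases h1 : v.contains x <;> cases h2 : x == p <;> simp_all
  calc ((pof.flatMap Prod.snd).filter (fun x => !((v.insert p d).contains x))).length
      = (((pof.flatMap Prod.snd).filter (fun x => !(v.contains x))).filter (fun x => !(x == p))).length := by
        rw [List.filter_filter]
        exact congrArg List.length (List.filter_congr (fun x _ => hfun x))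
    _ < ((pof.flatMap Prod.snd).filter (fun x => !(v.contains x))).length := by
        rw [List.length_filter_lt_length_iff_exists]
        exact ⟨p, by simp [List.mem_filter, hmem, hc]⟩

theorem pvPushA_bound (pof : List (Int × List Int)) (d : Int) :
    ∀ (ps : List Int) (v : PySem.Dict Int Int), (∀ p ∈ ps, p ∈ pof.flatMap Prod.snd) →
    pvUnseen pof (pvPushA v ps d).1 + (pvPushA v ps d).2.length ≤ pvUnseen pof v := by
  intro ps
  induction ps with
  | nil => intro v _; simp [pvPushA]
  | cons p rest ih =>
    intro v hmem
    by_cases hc : v.contains p = true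
    · simpa [pvPushA, hc] using ih v (fun q hq => hmem q (List.mem_cons_of_mem _ hq))
    · have hc' : v.contains p = false := by simpa using hc
      have hlt := pvUnseen_insert_lt pof v p d (hmem p (List.mem_cons_self ..)) hc'
      have := ih (v.insert p d) (fun q hq => hmem q (List.mem_cons_of_mem _ hq))
      simp only [pvPushA, hc', Bool.false_eq_true, if_false, List.length_cons]
      omega

theorem pvLook_subset (pof : List (Int × List Int)) (k : Int) :
    ∀ p ∈ pvLook pof k, p ∈ pof.flatMap Prod.snd := by
  induction pof with
  | nil => simp [pvLook]
  | cons hd tl ih =>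
    intro p hp
    obtain ⟨a, b⟩ := hd
    simp only [pvLook] at hp
    by_cases h : a == k
    · simp only [h] at hp
      exact List.mem_flatMap.2 ⟨(a, b), List.mem_cons_self .., hp⟩
    · rw [if_neg h] at hp
      have := ih p hp
      simp only [List.flatMap_cons]
      exact List.mem_append_right _ this

-- A's while loop over the deque of (node, depth) pairs
def pvBfsA (pof : List (Int × List Int)) (v : PySem.Dict Int Int) (q : List (Int × Int)) :
    PySem.Dict Int Int :=
  match q with
  | [] => v
  | (cur, dep) :: rest =>
    let r := pvPushA v (pvLook pof cur) (dep + 1)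
    pvBfsA pof r.1 (rest ++ r.2)
termination_by 2 * pvUnseen pof v + q.length
decreasing_by
  have h := pvPushA_bound pof (dep + 1) (pvLook pof cur) v (pvLook_subset pof cur)
  simp only [List.length_append, List.length_cons]
  omega

def ancestors_with_depth (person_id : Int) (parents_of : List (Int × List Int)) : List (Int × Int) :=
  (pvBfsA parents_of ((PySem.Dict.empty).insert person_id 0) [(person_id, 0)]).items

-- ===== PORT B =====
-- inner 'for p in parents_of.get(node, ()) if p not in visited' of B's dict comprehension:
-- the unseen parents are inserted into the comprehension's dict 'acc' with value d1 = d + 1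
def pvCompInner (visited : PySem.Dict Int Int) (acc : PySem.Dict Int Int)
    (ps : List Int) (d1 : Int) : PySem.Dict Int Int :=
  match ps with
  | [] => acc
  | p :: rest =>
    if visited.contains p then pvCompInner visited acc rest d1
    else pvCompInner visited (acc.insert p d1) rest d1

-- outer 'for node, d in visited.items()' of B's dict comprehension
def pvComp (pof : List (Int × List Int)) (visited : PySem.Dict Int Int)
    (acc : PySem.Dict Int Int) (items : List (Int × Int)) : PySem.Dict Int Int :=
  match items with
  | [] => acc
  | (node, d) :: rest => pvComp pof visited (pvCompInner visited acc (pvLook pof node) (d + 1)) rest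

-- termination facts for B's while loop: the keys of the comprehension are unseen parent ids,
-- so a nonempty update strictly shrinks pvUnseen
theorem pvCompInner_prop (pof : List (Int × List Int)) (v : PySem.Dict Int Int) (d1 : Int) :
    ∀ (ps : List Int) (acc : PySem.Dict Int Int),
    (∀ p ∈ ps, p ∈ pof.flatMap Prod.snd) →
    (∀ kv ∈ acc.items, kv.1 ∈ pof.flatMap Prod.snd ∧ v.contains kv.1 = false) →
    ∀ kv ∈ (pvCompInner v acc ps d1).items, kv.1 ∈ pof.flatMap Prod.snd ∧ v.contains kv.1 = false := by
  intro ps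
  induction ps with
  | nil => intro acc _ hacc; simpa [pvCompInner] using hacc
  | cons p rest ih =>
    intro acc hps hacc
    by_cases hc : v.contains p = true
    · simp only [pvCompInner, hc, if_true]
      exact ih acc (fun q hq => hps q (List.mem_cons_of_mem _ hq)) hacc
    · have hc' : v.contains p = false := by simpa using hc
      simp only [pvCompInner, hc', Bool.false_eq_true, if_false]
      refine ih (acc.insert p d1) (fun q hq => hps q (List.mem_cons_of_mem _ hq)) ?_
      intro kv hkv
      rcases (PySem.Dict.mem_items_insert acc p d1 kv).1 hkv with h | ⟨h, _⟩
      · subst h; exact ⟨hps p (List.mem_cons_self ..), hc'⟩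
      · exact hacc kv h

theorem pvComp_prop (pof : List (Int × List Int)) (v : PySem.Dict Int Int) :
    ∀ (items : List (Int × Int)) (acc : PySem.Dict Int Int),
    (∀ kv ∈ acc.items, kv.1 ∈ pof.flatMap Prod.snd ∧ v.contains kv.1 = false) →
    ∀ kv ∈ (pvComp pof v acc items).items, kv.1 ∈ pof.flatMap Prod.snd ∧ v.contains kv.1 = false := by
  intro items
  induction items with
  | nil => intro acc hacc; simpa [pvComp] using hacc
  | cons hd rest ih =>
    intro acc hacc
    obtain ⟨node, d⟩ := hd
    simp only [pvComp]
    exact ih _ (pvCompInner_prop pof v (d + 1) (pvLook pof node) acc (pvLook_subset pof node) hacc)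

theorem pvUnseen_insert_le (pof : List (Int × List Int)) (v : PySem.Dict Int Int) (p : Int) (d : Int) :
    pvUnseen pof (v.insert p d) ≤ pvUnseen pof v := by
  unfold pvUnseen
  rw [← List.countP_eq_length_filter, ← List.countP_eq_length_filter]
  refine List.countP_mono_left ?_
  intro x _ hx
  rw [PySem.Dict.contains_insert] at hx
  cases h : v.contains x
  · simp
  · simp [h] at hx

theorem pvUnseen_foldl_le (pof : List (Int × List Int)) :
    ∀ (l : List (Int × Int)) (v : PySem.Dict Int Int),
    pvUnseen pof (l.foldl (fun d p => d.insert p.1 p.2) v) ≤ pvUnseen pof v := by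
  intro l
  induction l with
  | nil => intro v; simp
  | cons kv rest ih =>
    intro v
    calc pvUnseen pof (((kv :: rest) : List (Int × Int)).foldl (fun d p => d.insert p.1 p.2) v)
        = pvUnseen pof (rest.foldl (fun d p => d.insert p.1 p.2) (v.insert kv.1 kv.2)) := rfl
      _ ≤ pvUnseen pof (v.insert kv.1 kv.2) := ih _
      _ ≤ pvUnseen pof v := pvUnseen_insert_le pof v kv.1 kv.2

theorem pvUpdate_dec (pof : List (Int × List Int)) (v : PySem.Dict Int Int)
    (l : List (Int × Int)) (hne : l ≠ [])
    (hl : ∀ kv ∈ l, kv.1 ∈ pof.flatMap Prod.snd ∧ v.contains kv.1 = false) :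
    pvUnseen pof (v.update l) < pvUnseen pof v := by
  cases l with
  | nil => exact absurd rfl hne
  | cons kv rest =>
    have h1 : v.update (kv :: rest) = rest.foldl (fun d p => d.insert p.1 p.2) (v.insert kv.1 kv.2) := rfl
    have h2 := pvUnseen_foldl_le pof rest (v.insert kv.1 kv.2)
    have h3 := pvUnseen_insert_lt pof v kv.1 kv.2 (hl kv (List.mem_cons_self ..)).1
      (hl kv (List.mem_cons_self ..)).2
    rw [h1]; omega

-- B's 'while True' loop: recompute the comprehension over the whole visited dict,
-- stop when it is empty, otherwise merge it in and go round again
def pvFixB (pof : List (Int × List Int)) (v : PySem.Dict Int Int) : PySem.Dict Int Int :=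
  if h : (pvComp pof v PySem.Dict.empty v.items).items = [] then v
  else pvFixB pof (v.update (pvComp pof v PySem.Dict.empty v.items).items)
termination_by pvUnseen pof v
decreasing_by
  exact pvUpdate_dec pof v _ h
    (pvComp_prop pof v v.items PySem.Dict.empty (by
      intro kv hkv
      have he : (PySem.Dict.empty : PySem.Dict Int Int).items = [] := rfl
      rw [he] at hkv
      cases hkv))

def ancestors_with_depth_alt (person_id : Int) (parents_of : List (Int × List Int)) : List (Int × Int) :=
  (pvFixB parents_of ((PySem.Dict.empty).insert person_id 0)).items

-- ===== PRECONDITION & SPEC =====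
def Spec_ancestors_with_depth (person_id : Int) (parents_of : List (Int × List Int)) (out : List (Int × Int)) : Prop := out = ancestors_with_depth_alt person_id parents_of
instance (person_id : Int) (parents_of : List (Int × List Int)) (out : List (Int × Int)) : Decidable (Spec_ancestors_with_depth person_id parents_of out) := by unfold Spec_ancestors_with_depth; infer_instance

-- ===== CLAIM (what is proved, stated in full; the proofs are below) =====
def Claim_equal_ancestors_with_depth : Prop := ∀ (person_id : Int) (parents_of : List (Int × List Int)), Dom_ancestors_with_depth person_id parents_of → Spec_ancestors_with_depth person_id parents_of (ancestors_with_depth person_id parents_of)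

-- ===== LEMMAS AND PROOFS =====

-- intermediate level-synchronous form used only by the proof: A's deque processed level by level
def pvPushB (v : PySem.Dict Int Int) (acc : List Int) (ps : List Int) (d : Int) :
    PySem.Dict Int Int × List Int :=
  match ps with
  | [] => (v, acc)
  | p :: rest =>
    if v.contains p then pvPushB v acc rest d
    else pvPushB (v.insert p d) (acc ++ [p]) rest d

def pvLevelB (pof : List (Int × List Int)) (v : PySem.Dict Int Int) (acc : List Int)
    (fr : List Int) (d : Int) : PySem.Dict Int Int × List Int :=
  match fr with
  | [] => (v, acc)
  | c :: rest =>
    let r := pvPushB v acc (pvLook pof c) d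
    pvLevelB pof r.1 r.2 rest d

theorem pvPushB_bound (pof : List (Int × List Int)) (d : Int) :
    ∀ (ps : List Int) (v : PySem.Dict Int Int) (acc : List Int), (∀ p ∈ ps, p ∈ pof.flatMap Prod.snd) →
    pvUnseen pof (pvPushB v acc ps d).1 + (pvPushB v acc ps d).2.length ≤ pvUnseen pof v + acc.length := by
  intro ps
  induction ps with
  | nil => intro v acc _; simp [pvPushB]
  | cons p rest ih =>
    intro v acc hmem
    by_cases hc : v.contains p = true
    · simpa [pvPushB, hc] using ih v acc (fun q hq => hmem q (List.mem_cons_of_mem _ hq))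
    · have hc' : v.contains p = false := by simpa using hc
      have hlt := pvUnseen_insert_lt pof v p d (hmem p (List.mem_cons_self ..)) hc'
      have := ih (v.insert p d) (acc ++ [p]) (fun q hq => hmem q (List.mem_cons_of_mem _ hq))
      simp only [pvPushB, hc', Bool.false_eq_true, if_false, List.length_append,
        List.length_cons, List.length_nil] at *
      omega

theorem pvLevelB_bound (pof : List (Int × List Int)) (d : Int) :
    ∀ (fr : List Int) (v : PySem.Dict Int Int) (acc : List Int),
    pvUnseen pof (pvLevelB pof v acc fr d).1 + (pvLevelB pof v acc fr d).2.length ≤ pvUnseen pof v + acc.length := by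
  intro fr
  induction fr with
  | nil => intro v acc; simp [pvLevelB]
  | cons c rest ih =>
    intro v acc
    have h1 := pvPushB_bound pof d (pvLook pof c) v acc (pvLook_subset pof c)
    have h2 := ih (pvPushB v acc (pvLook pof c) d).1 (pvPushB v acc (pvLook pof c) d).2
    simp only [pvLevelB]
    omega

def pvLoopB (pof : List (Int × List Int)) (v : PySem.Dict Int Int) (fr : List Int) (d : Int) :
    PySem.Dict Int Int :=
  match fr with
  | [] => v
  | _ :: _ =>
    let r := pvLevelB pof v [] fr (d + 1)
    pvLoopB pof r.1 r.2 (d + 1)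
termination_by pvUnseen pof v + fr.length
decreasing_by
  have h := pvLevelB_bound pof (d + 1) fr v []
  simp only [List.length_nil, List.length_cons] at *
  omega

-- ---- step 1 (A = level-synchronous loop) ----

theorem pvPushAB (d : Int) : ∀ (ps : List Int) (v : PySem.Dict Int Int) (acc : List Int),
    pvPushB v acc ps d = ((pvPushA v ps d).1, acc ++ (pvPushA v ps d).2.map Prod.fst) := by
  intro ps
  induction ps with
  | nil => intro v acc; simp [pvPushA, pvPushB]
  | cons p rest ih =>
    intro v acc
    by_cases hc : v.contains p = true
    · simp [pvPushA, pvPushB, hc, ih]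
    · have hc' : v.contains p = false := by simpa using hc
      simp [pvPushA, pvPushB, hc', ih]

theorem pvPushA_snd (d : Int) : ∀ (ps : List Int) (v : PySem.Dict Int Int),
    (pvPushA v ps d).2 = ((pvPushA v ps d).2.map Prod.fst).map (fun c => (c, d)) := by
  intro ps
  induction ps with
  | nil => intro v; simp [pvPushA]
  | cons p rest ih =>
    intro v
    by_cases hc : v.contains p = true
    · simpa [pvPushA, hc] using ih v
    · have hc' : v.contains p = false := by simpa using hc
      simp only [pvPushA, hc', Bool.false_eq_true, if_false, List.map_cons]
      exact congrArg _ (ih _)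

theorem pvLevel_eq (pof : List (Int × List Int)) (d : Int) :
    ∀ (fr : List Int) (v : PySem.Dict Int Int) (nx : List Int),
    pvBfsA pof v (fr.map (fun c => (c, d)) ++ nx.map (fun c => (c, d + 1)))
      = pvBfsA pof (pvLevelB pof v nx fr (d + 1)).1
          ((pvLevelB pof v nx fr (d + 1)).2.map (fun c => (c, d + 1))) := by
  intro fr
  induction fr with
  | nil => intro v nx; simp [pvLevelB]
  | cons c rest ih =>
    intro v nx
    simp only [List.map_cons, List.cons_append, pvBfsA, pvLevelB]
    rw [pvPushAB]
    have hsnd := pvPushA_snd (d + 1) (pvLook pof c) v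
    calc pvBfsA pof (pvPushA v (pvLook pof c) (d + 1)).1
            ((rest.map (fun c => (c, d)) ++ nx.map (fun c => (c, d + 1))) ++ (pvPushA v (pvLook pof c) (d + 1)).2)
        = pvBfsA pof (pvPushA v (pvLook pof c) (d + 1)).1
            (rest.map (fun c => (c, d)) ++ (nx ++ ((pvPushA v (pvLook pof c) (d + 1)).2.map Prod.fst)).map (fun c => (c, d + 1))) := by
          rw [List.map_append]
          rw [List.append_assoc]
          exact congrArg _ (congrArg _ (congrArg _ hsnd))
      _ = _ := ih _ _

theorem pvMainA (pof : List (Int × List Int)) :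
    ∀ (n : Nat) (fr : List Int) (v : PySem.Dict Int Int) (d : Int),
    pvUnseen pof v + fr.length ≤ n →
    pvBfsA pof v (fr.map (fun c => (c, d))) = pvLoopB pof v fr d := by
  intro n
  induction n with
  | zero =>
    intro fr v d h
    have : fr = [] := by cases fr with | nil => rfl | cons a b => simp at h
    subst this; simp [pvBfsA, pvLoopB]
  | succ n ih =>
    intro fr v d h
    cases fr with
    | nil => simp [pvBfsA, pvLoopB]
    | cons c rest =>
      have hlev := pvLevel_eq pof d (c :: rest) v []
      simp only [List.map_nil, List.append_nil] at hlev
      rw [hlev]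
      rw [ih (pvLevelB pof v [] (c :: rest) (d + 1)).2 (pvLevelB pof v [] (c :: rest) (d + 1)).1 (d + 1)
        (by have := pvLevelB_bound pof (d + 1) (c :: rest) v []
            simp only [List.length_nil, List.length_cons] at *
            omega)]
      conv_rhs => rw [pvLoopB]

-- ---- step 2 (level-synchronous loop = B's round-based closure) ----

-- Dict.update is a left fold of inserts
theorem pvUpdate_def (v : PySem.Dict Int Int) (l : List (Int × Int)) :
    v.update l = l.foldl (fun d p => d.insert p.1 p.2) v := rfl

theorem pvContains_update (q : Int) :
    ∀ (l : List (Int × Int)) (v : PySem.Dict Int Int),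
    (v.update l).contains q = (v.contains q || l.any (fun kv => q == kv.1)) := by
  intro l
  induction l with
  | nil => intro v; simp [pvUpdate_def]
  | cons kv rest ih =>
    intro v
    have h1 : v.update (kv :: rest) = (v.insert kv.1 kv.2).update rest := rfl
    rw [h1, ih, PySem.Dict.contains_insert]
    cases h : v.contains q <;> simp [List.any_cons]

-- a dict's contains test, read off its items list
theorem pvContains_items (n : PySem.Dict Int Int) (q : Int) :
    n.contains q = n.items.any (fun kv => q == kv.1) := by
  have hk : n.keys = n.items.map (·.1) := rfl
  by_cases hm : q ∈ n.keys
  · rw [(PySem.Dict.contains_iff_mem_keys n q).2 hm]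
    rw [hk] at hm
    obtain ⟨kv, hkv, he⟩ := List.mem_map.1 hm
    exact (List.any_eq_true.2 ⟨kv, hkv, by simp [← he]⟩).symm
  · have h1 : n.contains q = false := by
      cases h : n.contains q
      · rfl
      · exact absurd ((PySem.Dict.contains_iff_mem_keys n q).1 h) hm
    rw [h1]
    symm
    rw [List.any_eq_false]
    intro kv hkv
    simp only [beq_iff_eq]
    intro he
    exact hm (hk ▸ List.mem_map.2 ⟨kv, hkv, he.symm⟩)

-- the inner loops correspond: A-side pvPushB over (vA, acc) vs B-side pvCompInner into the dict n
theorem pvPushComp (v : PySem.Dict Int Int) (d1 : Int) :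
    ∀ (ps : List Int) (acc : List Int) (n : PySem.Dict Int Int),
    n.items = acc.map (fun c => (c, d1)) →
    (∀ kv ∈ n.items, v.contains kv.1 = false) →
    n.keys.Nodup →
    (pvCompInner v n ps d1).items = (pvPushB (v.update n.items) acc ps d1).2.map (fun c => (c, d1))
    ∧ (pvPushB (v.update n.items) acc ps d1).1 = v.update (pvCompInner v n ps d1).items
    ∧ (∀ kv ∈ (pvCompInner v n ps d1).items, v.contains kv.1 = false)
    ∧ (pvCompInner v n ps d1).keys.Nodup := by
  intro ps
  induction ps with
  | nil =>
    intro acc n h1 h2 h3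
    exact ⟨by simpa [pvCompInner, pvPushB] using h1, by simp [pvCompInner, pvPushB], by simpa [pvCompInner] using h2, by simpa [pvCompInner] using h3⟩
  | cons p rest ih =>
    intro acc n h1 h2 h3
    have hvA : (v.update n.items).contains p = (v.contains p || n.items.any (fun kv => p == kv.1)) :=
      pvContains_update p n.items v
    by_cases hv : v.contains p = true
    · -- seen in the original visited: both sides skip
      have hA : (v.update n.items).contains p = true := by rw [hvA, hv]; simp
      simp only [pvCompInner, pvPushB, hv, hA, if_true]
      exact ih acc n h1 h2 h3
    · have hv' : v.contains p = false := by simpa using hv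
      by_cases hn : n.items.any (fun kv => p == kv.1) = true
      · -- already collected this round: A skips, B's insert is a no-op
        have hA : (v.update n.items).contains p = true := by rw [hvA, hv', hn]; simp
        have hnc : n.contains p = true := by rw [pvContains_items, hn]
        have hins : n.insert p d1 = n := by
          apply PySem.Dict.ext
          rw [PySem.Dict.items_insert_of_contains n d1 hnc]
          calc n.items.map (fun q => if q.1 == p then (p, d1) else q)
              = n.items.map id := List.map_congr_left (by
                  intro kv hkv
                  rw [h1] at hkv
                  obtain ⟨c, hc1, hc2⟩ := List.mem_map.1 hkv
                  subst hc2
                  by_cases he : (c == p) = true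
                  · have hcp : c = p := by simpa using he
                    simp [hcp]
                  · simp only [id]
                    rw [if_neg (by simpa using he)])
            _ = n.items := List.map_id n.items
        simp only [pvCompInner, pvPushB, hv', Bool.false_eq_true, if_false, hA, if_true, hins]
        exact ih acc n h1 h2 h3
      · -- genuinely new: A inserts into visited and appends, B inserts into the round dict
        have hn' : n.items.any (fun kv => p == kv.1) = false := by
          simp only [Bool.not_eq_true] at hn
          exact hn
        have hA : (v.update n.items).contains p = false := by rw [hvA, hv', hn']; simp
        have hnc : n.contains p = false := by rw [pvContains_items, hn']
        have hitems : (n.insert p d1).items = n.items ++ [(p, d1)] :=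
          PySem.Dict.items_insert_of_not_contains n d1 hnc
        have hup : (v.update n.items).insert p d1 = v.update (n.insert p d1).items := by
          rw [hitems, pvUpdate_def, pvUpdate_def, List.foldl_append]
          rfl
        simp only [pvCompInner, pvPushB, hv', Bool.false_eq_true, if_false, hA, hup]
        refine ih (acc ++ [p]) (n.insert p d1) ?_ ?_ ?_
        · rw [hitems, h1, List.map_append]; rfl
        · intro kv hkv
          rcases (PySem.Dict.mem_items_insert n p d1 kv).1 hkv with h | ⟨h, _⟩
          · subst h; exact hv'
          · exact h2 kv h
        · exact PySem.Dict.nodup_keys_insert n p d1 h3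

-- the per-level loops correspond
theorem pvLevelComp (pof : List (Int × List Int)) (v : PySem.Dict Int Int) (d : Int) :
    ∀ (fr : List Int) (acc : List Int) (n : PySem.Dict Int Int),
    n.items = acc.map (fun c => (c, d + 1)) →
    (∀ kv ∈ n.items, v.contains kv.1 = false) →
    n.keys.Nodup →
    (pvComp pof v n (fr.map (fun c => (c, d)))).items
        = (pvLevelB pof (v.update n.items) acc fr (d + 1)).2.map (fun c => (c, d + 1))
    ∧ (pvLevelB pof (v.update n.items) acc fr (d + 1)).1
        = v.update (pvComp pof v n (fr.map (fun c => (c, d)))).items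
    ∧ (∀ kv ∈ (pvComp pof v n (fr.map (fun c => (c, d)))).items, v.contains kv.1 = false)
    ∧ (pvComp pof v n (fr.map (fun c => (c, d)))).keys.Nodup := by
  intro fr
  induction fr with
  | nil =>
    intro acc n h1 h2 h3
    exact ⟨by simpa [pvComp, pvLevelB] using h1, by simp [pvComp, pvLevelB], by simpa [pvComp] using h2, by simpa [pvComp] using h3⟩
  | cons c rest ih =>
    intro acc n h1 h2 h3
    obtain ⟨e1, e2, e3, e4⟩ := pvPushComp v (d + 1) (pvLook pof c) acc n h1 h2 h3
    simp only [List.map_cons, pvComp, pvLevelB]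
    rw [e2]
    exact ih (pvPushB (v.update n.items) acc (pvLook pof c) (d + 1)).2 _ e1 e3 e4

-- the skipped part of the rescan: items all of whose parents are visited contribute nothing
theorem pvCompInner_skip (v : PySem.Dict Int Int) (d1 : Int) :
    ∀ (ps : List Int) (acc : PySem.Dict Int Int), (∀ p ∈ ps, v.contains p = true) →
    pvCompInner v acc ps d1 = acc := by
  intro ps
  induction ps with
  | nil => intro acc _; rfl
  | cons p rest ih =>
    intro acc h
    simp only [pvCompInner, h p (List.mem_cons_self ..), if_true]
    exact ih acc (fun q hq => h q (List.mem_cons_of_mem _ hq))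

theorem pvComp_skip (pof : List (Int × List Int)) (v : PySem.Dict Int Int) :
    ∀ (items : List (Int × Int)) (acc : PySem.Dict Int Int),
    (∀ kv ∈ items, ∀ p ∈ pvLook pof kv.1, v.contains p = true) →
    pvComp pof v acc items = acc := by
  intro items
  induction items with
  | nil => intro acc _; rfl
  | cons kv rest ih =>
    intro acc h
    obtain ⟨node, d⟩ := kv
    simp only [pvComp]
    rw [pvCompInner_skip v (d + 1) (pvLook pof node) acc (h (node, d) (List.mem_cons_self ..))]
    exact ih acc (fun q hq => h q (List.mem_cons_of_mem _ hq))

theorem pvComp_append (pof : List (Int × List Int)) (v : PySem.Dict Int Int) :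
    ∀ (l1 l2 : List (Int × Int)) (acc : PySem.Dict Int Int),
    pvComp pof v acc (l1 ++ l2) = pvComp pof v (pvComp pof v acc l1) l2 := by
  intro l1
  induction l1 with
  | nil => intro l2 acc; rfl
  | cons kv rest ih =>
    intro l2 acc
    obtain ⟨node, d⟩ := kv
    simp only [List.cons_append, pvComp]
    exact ih l2 _

-- monotonicity / coverage: after a level, every parent of a frontier node is visited
theorem pvPushB_mono (d : Int) :
    ∀ (ps : List Int) (v : PySem.Dict Int Int) (acc : List Int) (q : Int),
    v.contains q = true → (pvPushB v acc ps d).1.contains q = true := by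
  intro ps
  induction ps with
  | nil => intro v acc q h; simpa [pvPushB] using h
  | cons p rest ih =>
    intro v acc q h
    by_cases hc : v.contains p = true
    · simpa [pvPushB, hc] using ih v acc q h
    · have hc' : v.contains p = false := by simpa using hc
      simp only [pvPushB, hc', Bool.false_eq_true, if_false]
      exact ih _ _ q (by rw [PySem.Dict.contains_insert, h]; simp)

theorem pvPushB_cover (d : Int) :
    ∀ (ps : List Int) (v : PySem.Dict Int Int) (acc : List Int) (p : Int),
    p ∈ ps → (pvPushB v acc ps d).1.contains p = true := by
  intro ps
  induction ps with
  | nil => intro v acc p h; cases h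
  | cons c rest ih =>
    intro v acc p h
    by_cases hc : v.contains c = true
    · rcases List.mem_cons.1 h with he | h
      · subst he
        simpa [pvPushB, hc] using pvPushB_mono d rest v acc p hc
      · simpa [pvPushB, hc] using ih v acc p h
    · have hc' : v.contains c = false := by simpa using hc
      simp only [pvPushB, hc', Bool.false_eq_true, if_false]
      rcases List.mem_cons.1 h with he | h
      · subst he
        exact pvPushB_mono d rest _ _ p (by rw [PySem.Dict.contains_insert]; simp)
      · exact ih _ _ p h

theorem pvLevelB_mono (pof : List (Int × List Int)) (d : Int) :
    ∀ (fr : List Int) (v : PySem.Dict Int Int) (acc : List Int) (q : Int),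
    v.contains q = true → (pvLevelB pof v acc fr d).1.contains q = true := by
  intro fr
  induction fr with
  | nil => intro v acc q h; simpa [pvLevelB] using h
  | cons c rest ih =>
    intro v acc q h
    simp only [pvLevelB]
    exact ih _ _ q (pvPushB_mono d (pvLook pof c) v acc q h)

theorem pvLevelB_cover (pof : List (Int × List Int)) (d : Int) :
    ∀ (fr : List Int) (v : PySem.Dict Int Int) (acc : List Int) (c : Int) (p : Int),
    c ∈ fr → p ∈ pvLook pof c → (pvLevelB pof v acc fr d).1.contains p = true := by
  intro fr
  induction fr with
  | nil => intro v acc c p h _; cases h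
  | cons c0 rest ih =>
    intro v acc c p h hp
    simp only [pvLevelB]
    rcases List.mem_cons.1 h with he | h
    · subst he
      exact pvLevelB_mono pof d rest _ _ p (pvPushB_cover d (pvLook pof c) v acc p hp)
    · exact ih _ _ c p h hp

-- the main correspondence: under the invariant, the level loop equals the closure loop
theorem pvMainB (pof : List (Int × List Int)) :
    ∀ (N : Nat) (fr : List Int) (v : PySem.Dict Int Int) (d : Int) (pre : List (Int × Int)),
    pvUnseen pof v + fr.length ≤ N →
    v.items = pre ++ fr.map (fun c => (c, d)) →
    (∀ kv ∈ pre, ∀ p ∈ pvLook pof kv.1, v.contains p = true) →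
    pvLoopB pof v fr d = pvFixB pof v := by
  intro N
  induction N with
  | zero =>
    intro fr v d pre h hitems hpre
    have hfr : fr = [] := by cases fr with | nil => rfl | cons a b => simp at h
    subst hfr
    have hn : pvComp pof v PySem.Dict.empty v.items = PySem.Dict.empty := by
      apply pvComp_skip
      intro kv hkv
      rw [hitems] at hkv
      simpa using hpre kv (by simpa using hkv)
    rw [pvFixB, dif_pos (by rw [hn]; rfl)]
    simp [pvLoopB]
  | succ N ih =>
    intro fr v d pre h hitems hpre
    -- the rescan of the whole dict: pre contributes nothing, fr gives the next level
    have hsplit : pvComp pof v PySem.Dict.empty v.items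
        = pvComp pof v PySem.Dict.empty (fr.map (fun c => (c, d))) := by
      rw [hitems, pvComp_append, pvComp_skip pof v pre PySem.Dict.empty hpre]
    obtain ⟨e1, e2, e3, e4⟩ := pvLevelComp pof v d fr [] PySem.Dict.empty rfl
      (by
        intro kv hkv
        have he : (PySem.Dict.empty : PySem.Dict Int Int).items = [] := rfl
        rw [he] at hkv
        cases hkv)
      PySem.Dict.nodup_keys_empty
    have hupd0 : v.update (PySem.Dict.empty : PySem.Dict Int Int).items = v := rfl
    rw [hupd0] at e1 e2
    cases fr with
    | nil =>
      have hn : pvComp pof v PySem.Dict.empty v.items = PySem.Dict.empty := by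
        rw [hsplit]; rfl
      rw [pvFixB, dif_pos (by rw [hn]; rfl)]
      simp [pvLoopB]
    | cons c rest =>
      set r := pvLevelB pof v [] (c :: rest) (d + 1) with hr
      cases hr2 : r.2 with
      | nil =>
        -- nothing new found: both loops stop at v
        have hn : (pvComp pof v PySem.Dict.empty v.items).items = [] := by
          rw [hsplit, e1, hr2]; rfl
        rw [pvFixB, dif_pos hn]
        rw [pvLoopB]
        have hr1 : r.1 = v := by
          rw [e2]
          have : (pvComp pof v PySem.Dict.empty ((c :: rest).map (fun c => (c, d)))).items = [] := by
            rw [e1, hr2]; rfl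
          rw [pvUpdate_def, this]
          rfl
        rw [← hr, hr2, hr1]
        simp [pvLoopB]
      | cons x xs =>
        -- new nodes found: both loops continue with the merged dict
        have hnne : (pvComp pof v PySem.Dict.empty v.items).items ≠ [] := by
          rw [hsplit, e1, hr2]; simp
        rw [pvFixB, dif_neg hnne]
        rw [pvLoopB]
        have hr1 : r.1 = v.update (pvComp pof v PySem.Dict.empty v.items).items := by
          rw [e2, hsplit]
        rw [← hr, ← hr1]
        -- invariant for the next round
        have hfresh : ∀ kv ∈ (pvComp pof v PySem.Dict.empty ((c :: rest).map (fun q => (q, d)))).items,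
            v.contains kv.1 = false := e3
        have hnodup : ((pvComp pof v PySem.Dict.empty ((c :: rest).map (fun q => (q, d)))).items.map Prod.fst).Nodup := e4
        have hitems' : r.1.items = v.items ++ r.2.map (fun q => (q, d + 1)) := by
          rw [hr1, hsplit, pvUpdate_def]
          rw [PySem.Dict.items_foldl_insert_fresh _ Prod.fst Prod.snd v hfresh hnodup]
          rw [e1]
          simp [List.map_map]
        refine ih r.2 r.1 (d + 1) v.items ?_ hitems' ?_
        · have hb := pvLevelB_bound pof (d + 1) (c :: rest) v []
          rw [← hr] at hb
          simp only [List.length_nil, List.length_cons] at *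
          omega
        · intro kv hkv p hp
          rw [hitems] at hkv
          rcases List.mem_append.1 hkv with hkv | hkv
          · exact pvLevelB_mono pof (d + 1) (c :: rest) v [] p (hpre kv hkv p hp)
          · obtain ⟨q, hq, hq2⟩ := List.mem_map.1 hkv
            have : kv.1 = q := by rw [← hq2]
            rw [this] at hp
            exact pvLevelB_cover pof (d + 1) (c :: rest) v [] q p hq hp

-- ===== VERDICT (by name: the statement is the Claim_ definition above) =====
theorem ancestors_with_depth_spec : Claim_equal_ancestors_with_depth := by
  intro pid pof _
  unfold Spec_ancestors_with_depth ancestors_with_depth ancestors_with_depth_alt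
  apply congrArg PySem.Dict.items
  have h0 : [(pid, (0 : Int))] = [pid].map (fun c => (c, (0 : Int))) := rfl
  rw [h0, pvMainA pof (pvUnseen pof ((PySem.Dict.empty).insert pid 0) + 1) [pid] _ 0 (by simp)]
  exact pvMainB pof (pvUnseen pof ((PySem.Dict.empty).insert pid 0) + 1) [pid]
    ((PySem.Dict.empty).insert pid 0) 0 [] (by simp) rfl (by simp)
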